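-- pv_equiv track=rewrite | github.com/daviddwlee84/KickStart | Competition/2020/C/A_Countdown/linear.py | solve
-- ===== SOURCE A (Python) =====
-- def solve(n, k, A) -> int:
--     count = 0
--     temp_k = -1
--     for num in A:
--         if num == k:
--             # start counting
--             temp_k = k
--
--         if num != temp_k:
--             # just go to next number
--             temp_k = -1
--             continue
--
--         if num == temp_k == 1:
--             # reach the end
--             count += 1
--
--         temp_k -= 1
--
--
--     return count
-- ===== SOURCE B (Python) =====
-- def solve(n, k, A) -> int:
--     # Build the target pattern [k, k-1, ..., 1] once, then count window positions
--     # whose slice equals it. k <= 0 or k > len(A) can never match, so return 0.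
--     if k <= 0 or k > len(A):
--         return 0
--     target = list(range(k, 0, -1))
--     return sum(1 for i in range(len(A) - k + 1) if A[i:i+k] == target)
-- ===== Notes on version B (the rewrite author's own statement) =====
-- stated objective: simpler
-- what changed: Replaces A's streaming state machine (sentinel temp_k tracking the expected next countdown value) with building the pattern [k..1] once and counting window positions whose slice equals it.
import Mathlib
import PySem

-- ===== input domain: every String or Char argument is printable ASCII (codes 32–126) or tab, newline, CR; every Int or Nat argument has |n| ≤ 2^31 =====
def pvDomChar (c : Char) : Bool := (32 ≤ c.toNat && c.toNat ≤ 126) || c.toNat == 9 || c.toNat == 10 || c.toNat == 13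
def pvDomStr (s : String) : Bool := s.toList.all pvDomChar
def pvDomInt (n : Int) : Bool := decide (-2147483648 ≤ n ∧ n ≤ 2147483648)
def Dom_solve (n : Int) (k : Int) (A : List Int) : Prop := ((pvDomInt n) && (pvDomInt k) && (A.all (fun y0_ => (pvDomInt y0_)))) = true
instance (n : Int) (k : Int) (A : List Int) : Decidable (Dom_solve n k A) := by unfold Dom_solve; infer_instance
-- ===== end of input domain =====

-- B replaces A's streaming countdown state machine by "build target [k..1], count matching windows" (simpler decomposition, same results).

-- ===== PORT A =====
-- one iteration of A's for-loop body on state (count, temp_k)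
def solveStep (k : Int) (s : Int × Int) (num : Int) : Int × Int :=
  let t := if num = k then k else s.2
  if num ≠ t then (s.1, -1)
  else ((if num = t ∧ t = 1 then s.1 + 1 else s.1), t - 1)

def solve (n : Int) (k : Int) (A : List Int) : Int :=
  (A.foldl (solveStep k) (0, -1)).1

-- ===== PORT B =====
def solve_alt (n : Int) (k : Int) (A : List Int) : Int :=
  if k ≤ 0 ∨ (A.length : Int) < k then 0
  else
    let target := PySem.List.pyRange k 0 (-1)
    (PySem.List.pyRange 0 ((A.length : Int) - k + 1) 1).foldl
      (fun acc i => if PySem.List.slice A (some i) (some (i + k)) = target then acc + 1 else acc) 0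

-- ===== PRECONDITION & SPEC =====
def Spec_solve (n : Int) (k : Int) (A : List Int) (out : Int) : Prop := out = solve_alt n k A
instance (n : Int) (k : Int) (A : List Int) (out : Int) : Decidable (Spec_solve n k A out) := by unfold Spec_solve; infer_instance

-- ===== CLAIM (what is proved, stated in full; the proofs are below) =====
def Claim_equal_solve : Prop := ∀ (n : Int) (k : Int) (A : List Int), Dom_solve n k A → Spec_solve n k A (solve n k A)

-- ===== LEMMAS AND PROOFS =====

-- number of positions in l where the pattern p occurs as a prefix of the suffix
def cntW (p : List Int) : List Int → Int
  | [] => 0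
  | x :: l => (if p <+: (x :: l) then 1 else 0) + cntW p l

-- the count component of the fold is additive in the starting count
theorem foldl_step_fst_add (k : Int) (l : List Int) :
    ∀ (c t : Int), (l.foldl (solveStep k) (c, t)).1 = c + (l.foldl (solveStep k) (0, t)).1 := by
  induction l with
  | nil => intro c t; simp
  | cons x l ih =>
    intro c t
    have hstep : solveStep k (c, t) x =
        (c + (solveStep k (0, t) x).1, (solveStep k (0, t) x).2) := by
      simp only [solveStep]; split_ifs <;> simp
    simp only [List.foldl_cons, hstep]
    rw [ih (c + (solveStep k (0, t) x).1) ((solveStep k (0, t) x).2),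
        ih ((solveStep k (0, t) x).1) ((solveStep k (0, t) x).2)]
    ring

-- for k ≤ 0 the state stays nonpositive and the count never increments
theorem foldl_step_zero (k : Int) (hk : k ≤ 0) (l : List Int) :
    ∀ (t : Int), t ≤ 0 → (l.foldl (solveStep k) (0, t)).1 = 0 := by
  induction l with
  | nil => intro t _; simp
  | cons x l ih =>
    intro t ht
    simp only [List.foldl_cons]
    rw [foldl_step_fst_add]
    have : (solveStep k (0, t) x).1 = 0 ∧ (solveStep k (0, t) x).2 ≤ 0 := by
      simp only [solveStep]; split_ifs with h1 h2 h3 <;> simp_all <;> omega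
    rw [this.1, ih _ this.2]
    simp

-- the countdown pattern through a cons
theorem pat_cons_iff (t : Int) (ht : 0 < t) (x : Int) (l : List Int) :
    PySem.List.pyRange t 0 (-1) <+: (x :: l) ↔
      (x = t ∧ PySem.List.pyRange (t-1) 0 (-1) <+: l) := by
  rw [PySem.List.pyRange_neg_one_cons ht, List.cons_prefix_cons, eq_comm]

theorem pat_one_nil : PySem.List.pyRange ((1:Int) - 1) 0 (-1) = [] :=
  PySem.List.pyRange_neg_one_eq_nil (by omega)

-- main machine invariant: starting from state t, the fold's count equals the window
-- count plus 1 if a countdown t,t-1,…,1 (with 1 ≤ t < k) is already in progress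
theorem machine_invariant (k : Int) (hk : 1 ≤ k) (l : List Int) :
    ∀ (t : Int), (t ≤ 0 ∨ (1 ≤ t ∧ t ≤ k)) →
      (l.foldl (solveStep k) (0, t)).1 =
        cntW (PySem.List.pyRange k 0 (-1)) l +
          (if 1 ≤ t ∧ t < k ∧ PySem.List.pyRange t 0 (-1) <+: l then 1 else 0) := by
  induction l with
  | nil =>
    intro t _
    have hno : ¬ (1 ≤ t ∧ t < k ∧ PySem.List.pyRange t 0 (-1) <+: ([] : List Int)) := by
      rintro ⟨h1, _, hp⟩
      rw [PySem.List.pyRange_neg_one_cons (by omega)] at hp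
      simp at hp
    simp only [List.foldl_nil, cntW]
    rw [if_neg hno]
    simp
  | cons x l ih =>
    intro t ht
    have hk0 : (0:Int) < k := by omega
    simp only [List.foldl_cons]
    rw [foldl_step_fst_add]
    rcases eq_or_ne x k with hxk | hxk
    · -- x = k: restart the countdown at k
      have hs : solveStep k (0, t) x = ((if k = 1 then 1 else 0), k - 1) := by
        simp only [solveStep, hxk]; split_ifs <;> simp_all
      rw [hs, ih (k - 1) (by omega)]
      have hW : cntW (PySem.List.pyRange k 0 (-1)) (x :: l) =
          (if PySem.List.pyRange (k-1) 0 (-1) <+: l then 1 else 0) +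
            cntW (PySem.List.pyRange k 0 (-1)) l := by
        simp [cntW, pat_cons_iff _ hk0, hxk]
      rw [hW]
      have hno : ¬ (1 ≤ t ∧ t < k ∧ PySem.List.pyRange t 0 (-1) <+: (x :: l)) := by
        rintro ⟨h1, h2, hp⟩
        rw [pat_cons_iff t (by omega) x l] at hp
        omega
      rw [if_neg hno]
      rcases eq_or_ne k 1 with h1 | h1
      · have hpl : PySem.List.pyRange (k-1) 0 (-1) <+: l := by
          rw [h1, pat_one_nil]; exact List.nil_prefix
        have hno2 : ¬ (1 ≤ k - 1 ∧ k - 1 < k ∧ PySem.List.pyRange (k-1) 0 (-1) <+: l) := by omega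
        rw [if_pos h1, if_neg hno2, if_pos hpl]
        ring
      · by_cases hp : PySem.List.pyRange (k-1) 0 (-1) <+: l
        · have hc : (1 ≤ k - 1 ∧ k - 1 < k ∧ PySem.List.pyRange (k-1) 0 (-1) <+: l) := ⟨by omega, by omega, hp⟩
          rw [if_neg h1, if_pos hc, if_pos hp]
          ring
        · have hc : ¬ (1 ≤ k - 1 ∧ k - 1 < k ∧ PySem.List.pyRange (k-1) 0 (-1) <+: l) := by
            rintro ⟨_, _, h⟩; exact hp h
          rw [if_neg h1, if_neg hc, if_neg hp]
          ring
    · -- x ≠ k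
      rcases eq_or_ne x t with hxt | hxt
      · -- continue the countdown
        have hs : solveStep k (0, t) x = ((if t = 1 then 1 else 0), t - 1) := by
          simp only [solveStep, if_neg hxk, hxt]
          split_ifs <;> simp_all
        rw [hs, ih (t - 1) (by omega)]
        have hW : cntW (PySem.List.pyRange k 0 (-1)) (x :: l) =
            cntW (PySem.List.pyRange k 0 (-1)) l := by
          rw [cntW]
          have : ¬ PySem.List.pyRange k 0 (-1) <+: (x :: l) := by
            rw [pat_cons_iff k (by omega) x l]
            rintro ⟨h, _⟩; exact hxk (by omega)
          simp [this]
        rw [hW]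
        rcases ht with ht | ht
        · -- t ≤ 0: junk state, no counting either side
          have h1 : ¬ (1 ≤ t ∧ t < k ∧ PySem.List.pyRange t 0 (-1) <+: (x :: l)) := by omega
          have h2 : ¬ (1 ≤ t - 1 ∧ t - 1 < k ∧ PySem.List.pyRange (t-1) 0 (-1) <+: l) := by omega
          have h3 : ¬ (t = 1) := by omega
          rw [if_neg h3, if_neg h2, if_neg h1]
          ring
        · -- 1 ≤ t ≤ k, and t < k since x = t ≠ k
          have htk : t < k := by
            rcases eq_or_ne t k with h | h
            · exact absurd (hxt.trans h) hxk
            · omega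
          have hpref : PySem.List.pyRange t 0 (-1) <+: (x :: l) ↔
              PySem.List.pyRange (t-1) 0 (-1) <+: l := by
            rw [pat_cons_iff t (by omega) x l]
            constructor
            · rintro ⟨_, h⟩; exact h
            · intro h; exact ⟨hxt, h⟩
          rcases eq_or_ne t 1 with h1 | h1
          · have hpl : PySem.List.pyRange (t-1) 0 (-1) <+: l := by
              rw [h1, pat_one_nil]; exact List.nil_prefix
            have h2 : ¬ (1 ≤ t - 1 ∧ t - 1 < k ∧ PySem.List.pyRange (t-1) 0 (-1) <+: l) := by omega
            have h3 : 1 ≤ t ∧ t < k ∧ PySem.List.pyRange t 0 (-1) <+: (x :: l) :=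
              ⟨by omega, htk, hpref.mpr hpl⟩
            rw [if_pos h1, if_neg h2, if_pos h3]
            ring
          · by_cases hp : PySem.List.pyRange (t-1) 0 (-1) <+: l
            · have ha : 1 ≤ t - 1 ∧ t - 1 < k ∧ PySem.List.pyRange (t-1) 0 (-1) <+: l :=
                ⟨by omega, by omega, hp⟩
              have hb : 1 ≤ t ∧ t < k ∧ PySem.List.pyRange t 0 (-1) <+: (x :: l) :=
                ⟨by omega, htk, hpref.mpr hp⟩
              rw [if_neg h1, if_pos ha, if_pos hb]
              ring
            · have ha : ¬ (1 ≤ t - 1 ∧ t - 1 < k ∧ PySem.List.pyRange (t-1) 0 (-1) <+: l) := by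
                rintro ⟨_, _, h⟩; exact hp h
              have hb : ¬ (1 ≤ t ∧ t < k ∧ PySem.List.pyRange t 0 (-1) <+: (x :: l)) := by
                rintro ⟨_, _, h⟩; exact hp (hpref.mp h)
              rw [if_neg h1, if_neg ha, if_neg hb]
              ring
      · -- mismatch: reset to -1
        have hs : solveStep k (0, t) x = (0, -1) := by
          simp only [solveStep, if_neg hxk]
          split_ifs with h <;> simp_all
        rw [hs, ih (-1) (by omega)]
        have hW : cntW (PySem.List.pyRange k 0 (-1)) (x :: l) =
            cntW (PySem.List.pyRange k 0 (-1)) l := by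
          rw [cntW]
          have : ¬ PySem.List.pyRange k 0 (-1) <+: (x :: l) := by
            rw [pat_cons_iff k (by omega) x l]
            rintro ⟨h, _⟩; exact hxk (by omega)
          simp [this]
        rw [hW]
        have h1 : ¬ ((1:Int) ≤ -1 ∧ (-1:Int) < k ∧ PySem.List.pyRange (-1) 0 (-1) <+: l) := by omega
        have h2 : ¬ (1 ≤ t ∧ t < k ∧ PySem.List.pyRange t 0 (-1) <+: (x :: l)) := by
          rintro ⟨ha, hb, hp⟩
          rw [pat_cons_iff t (by omega) x l] at hp
          exact hxt hp.1
        rw [if_neg h1, if_neg h2]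
        ring

-- cntW as a count over suffix positions
theorem cntW_eq_countP (p : List Int) (l : List Int) :
    cntW p l = ((List.range l.length).countP (fun j => decide (p <+: l.drop j)) : Int) := by
  induction l with
  | nil => simp [cntW]
  | cons x l ih =>
    rw [cntW, ih]
    rw [show (x :: l).length = l.length + 1 from rfl, List.range_succ_eq_map]
    rw [List.countP_cons, List.countP_map]
    simp only [List.drop_zero]
    have hc : (List.range l.length).countP ((fun j => decide (p <+: (x :: l).drop j)) ∘ Nat.succ)
        = (List.range l.length).countP (fun j => decide (p <+: l.drop j)) := by
      apply List.countP_congr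
      intro a _
      simp [Function.comp, List.drop_succ_cons]
    rw [hc]
    push_cast
    split_ifs <;> simp_all <;> ring

-- pattern occurrences need k.toNat elements
theorem length_pat (k : Int) : (PySem.List.pyRange k 0 (-1)).length = k.toNat := by
  rw [PySem.List.pyRange_neg_one]; simp

theorem cntW_zero_of_short (k : Int) (l : List Int) (h : l.length < k.toNat) :
    cntW (PySem.List.pyRange k 0 (-1)) l = 0 := by
  induction l with
  | nil => simp [cntW]
  | cons x l ih =>
    simp only [List.length_cons] at h
    rw [cntW, ih (by omega)]
    have : ¬ PySem.List.pyRange k 0 (-1) <+: (x :: l) := by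
      intro hp
      have hle := hp.length_le
      rw [length_pat, List.length_cons] at hle
      omega
    simp [this]

-- slice window equals the pattern iff the pattern is a prefix of the suffix
theorem slice_eq_pat_iff (A : List Int) (k : Int) (hk : 1 ≤ k) (j : Nat) :
    (PySem.List.slice A (some (j : Int)) (some ((j : Int) + k)) = PySem.List.pyRange k 0 (-1)) ↔
      PySem.List.pyRange k 0 (-1) <+: A.drop j := by
  have hkeq : ((j : Int) + k) = ((j : Int) + ((k.toNat : Nat) : Int)) := by
    rw [Int.toNat_of_nonneg (by omega)]
  rw [hkeq, PySem.List.slice_natCast_add]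
  constructor
  · intro h
    rw [← h]
    exact List.take_prefix _ _
  · intro h
    have := List.prefix_iff_eq_take.mp h
    rw [length_pat] at this
    exact this.symm

-- the if-accumulating foldl is a countP
theorem foldl_if_count (p : Int → Bool) (l : List Int) :
    ∀ (acc : Int), l.foldl (fun a x => if p x then a + 1 else a) acc = acc + (l.countP p : Int) := by
  induction l with
  | nil => intro acc; simp
  | cons x l ih =>
    intro acc
    rw [List.foldl_cons, ih, List.countP_cons]
    split_ifs <;> simp_all <;> push_cast <;> ring

-- B's windowed fold computes cntW when 1 ≤ k ≤ len A
theorem cntW_eq_windows (A : List Int) (k : Int) (hk : 1 ≤ k) (hlen : k ≤ (A.length : Int)) :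
    cntW (PySem.List.pyRange k 0 (-1)) A =
      (PySem.List.pyRange 0 ((A.length : Int) - k + 1) 1).foldl
        (fun acc i => if PySem.List.slice A (some i) (some (i + k)) = PySem.List.pyRange k 0 (-1)
          then acc + 1 else acc) 0 := by
  rw [PySem.List.pyRange_one, List.foldl_map]
  have hfold := foldl_if_count
    (fun j : Int => decide (PySem.List.slice A (some j) (some (j + k)) = PySem.List.pyRange k 0 (-1)))
    (((List.range ((((A.length : Int) - k + 1) - 0).toNat)).map (fun n : Nat => (n : Int)))) 0
  rw [List.foldl_map] at hfold
  simp only [decide_eq_true_eq] at hfold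
  rw [show (fun (a : Int) (n : Nat) =>
        if PySem.List.slice A (some ((0 : Int) + (n:Int))) (some ((0 : Int) + (n:Int) + k)) = PySem.List.pyRange k 0 (-1)
        then a + 1 else a) =
      (fun (a : Int) (n : Nat) =>
        if PySem.List.slice A (some ((n : Int))) (some ((n : Int) + k)) = PySem.List.pyRange k 0 (-1)
        then a + 1 else a) from by funext a n; simp, hfold]
  rw [List.countP_map]
  have hm : (((A.length : Int) - k + 1) - 0).toNat = A.length - k.toNat + 1 := by omega
  rw [hm]
  have hcongr : (List.range (A.length - k.toNat + 1)).countP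
        ((fun j : Int => decide (PySem.List.slice A (some j) (some (j + k)) = PySem.List.pyRange k 0 (-1))) ∘ (fun n : Nat => (n : Int)))
      = (List.range (A.length - k.toNat + 1)).countP
        (fun j : Nat => decide (PySem.List.pyRange k 0 (-1) <+: A.drop j)) := by
    apply List.countP_congr
    intro a _
    simp only [Function.comp, decide_eq_true_eq]
    exact slice_eq_pat_iff A k hk a
  rw [hcongr, cntW_eq_countP]
  have hsplit : A.length = (A.length - k.toNat + 1) + (k.toNat - 1) := by omega
  rw [hsplit, List.range_add, List.countP_append]
  have hzero : (List.countP (fun j : Nat => decide (PySem.List.pyRange k 0 (-1) <+: A.drop j))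
      ((List.range (k.toNat - 1)).map (fun j => A.length - k.toNat + 1 + j))) = 0 := by
    rw [List.countP_eq_zero]
    intro a ha
    simp only [List.mem_map, List.mem_range] at ha
    obtain ⟨j, hj, rfl⟩ := ha
    simp only [decide_eq_true_eq]
    intro hp
    have := hp.length_le
    rw [length_pat, List.length_drop] at this
    omega
  rw [hzero]
  simp only [Nat.add_zero]
  have hrange : A.length - k.toNat + 1 + (k.toNat - 1) - k.toNat + 1 = A.length - k.toNat + 1 := by
    omega
  rw [hrange]
  omega

-- ===== VERDICT (by name: the statement is the Claim_ definition above) =====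
theorem solve_spec : Claim_equal_solve := by
  intro n k A _
  unfold Spec_solve solve solve_alt
  rcases (by omega : k ≤ 0 ∨ 0 < k) with hk | hk
  · rw [if_pos (Or.inl hk)]
    exact foldl_step_zero k hk A (-1) (by omega)
  · have hk1 : 1 ≤ k := hk
    have hM := machine_invariant k hk1 A (-1) (by omega)
    have hno : ¬ ((1:Int) ≤ -1 ∧ (-1:Int) < k ∧ PySem.List.pyRange (-1) 0 (-1) <+: A) := by omega
    rw [if_neg hno, add_zero] at hM
    rcases (by omega : (A.length : Int) < k ∨ k ≤ (A.length : Int)) with hlen | hlen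
    · rw [if_pos (Or.inr hlen)]
      rw [hM, cntW_zero_of_short k A (by omega)]
    · rw [if_neg (by rintro (h | h) <;> omega)]
      rw [hM]
      exact cntW_eq_windows A k hk1 hlen
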